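-- pv_equiv track=rewrite | github.com/FarzanRashid/Codewars-solutions | Balanced Number (Special Numbers Series #1 ).py | balanced_num
-- ===== SOURCE A (Python) =====
-- def balanced_num(number):
--     string = str(number)
--     if len(string) <= 2:
--         return "Balanced"
--     else:
--         leftsum = 0
--         rightsum = 0
--         if len(string) % 2 != 0:
--             midnum = len(string) // 2
--             left = string[:midnum]
--             right = string[midnum + 1:]
--             for i in left:
--                 leftsum += int(i)
--             for i in right:
--                 rightsum += int(i)
--             if leftsum == rightsum:
--                 return "Balanced"
--             else:
--                 return "Not Balanced"
--         if len(string) % 2 == 0: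
--             midnum = len(string) // 2
--             left = string[:midnum - 1]
--             right = string[midnum + 1:]
--             for i in left:
--                 leftsum += int(i)
--             for i in right:
--                 rightsum += int(i)
--             if leftsum == rightsum:
--                 return "Balanced"
--             else:
--                 return "Not Balanced"
-- ===== SOURCE B (Python) =====
-- def balanced_num(number):
--     s = str(number)
--     i, j = 0, len(s) - 1
--     leftsum = 0
--     rightsum = 0
--     while j - i >= 2:
--         leftsum += int(s[i])
--         rightsum += int(s[j])
--         i += 1
--         j -= 1
--     return "Balanced" if leftsum == rightsum else "Not Balanced"
-- ===== Notes on version B (the rewrite author's own statement) =====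
-- stated objective: simpler
-- what changed: Replaced A's parity branch with two sequential substring-summing loops by a single outside-in two-pointer loop (i from the left, j from the right, while j-i>=2) that accumulates both sums at once; the len<=2 guard disappears because the loop body never runs then.
import Mathlib
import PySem

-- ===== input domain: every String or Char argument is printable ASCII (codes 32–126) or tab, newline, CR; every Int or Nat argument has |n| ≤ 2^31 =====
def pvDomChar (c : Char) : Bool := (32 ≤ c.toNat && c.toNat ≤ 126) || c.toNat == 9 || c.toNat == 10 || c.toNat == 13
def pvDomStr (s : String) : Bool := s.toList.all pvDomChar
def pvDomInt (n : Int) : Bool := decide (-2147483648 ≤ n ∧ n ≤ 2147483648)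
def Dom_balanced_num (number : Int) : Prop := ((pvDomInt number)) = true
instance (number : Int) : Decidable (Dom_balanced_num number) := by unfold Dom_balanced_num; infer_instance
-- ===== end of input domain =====

-- B replaces A's parity split plus two substring-summing loops by a single outside-in
-- two-pointer loop (objective: simpler); return values agree on all numbers ≥ -9.

-- ===== PORT A =====
-- int(c) for a one-character string c; the .getD 0 is unreachable under Pre_ (all chars are digits there)
def pvDval (c : Char) : Int := (PySem.Int.ofChars? [c]).getD 0

def balanced_num (number : Int) : String :=
  let string := PySem.Int.toChars number          -- str(number), as its list of characters
  if string.length ≤ 2 then "Balanced"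
  else
    let leftsum : Int := 0
    let rightsum : Int := 0
    if string.length % 2 ≠ 0 then
      let midnum := string.length / 2
      let left := PySem.List.slice string none (some (midnum : Int))
      let right := PySem.List.slice string (some ((midnum : Int) + 1)) none
      let leftsum := left.foldl (fun a c => a + pvDval c) leftsum
      let rightsum := right.foldl (fun a c => a + pvDval c) rightsum
      if leftsum == rightsum then "Balanced" else "Not Balanced"
    else
      let midnum := string.length / 2
      let left := PySem.List.slice string none (some ((midnum : Int) - 1))
      let right := PySem.List.slice string (some ((midnum : Int) + 1)) none
      let leftsum := left.foldl (fun a c => a + pvDval c) leftsum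
      let rightsum := right.foldl (fun a c => a + pvDval c) rightsum
      if leftsum == rightsum then "Balanced" else "Not Balanced"

-- ===== PORT B =====
-- the while loop; s[i]/s[j] are always in range (0 ≤ i < j < len), so getD's default is unreachable
def pvLoop (l : List Char) (i j : Nat) (ls rs : Int) : Int × Int :=
  if i + 2 ≤ j then
    pvLoop l (i + 1) (j - 1) (ls + pvDval (l.getD i ' ')) (rs + pvDval (l.getD j ' '))
  else (ls, rs)
termination_by j - i

def balanced_num_alt (number : Int) : String :=
  let s := PySem.Int.toChars number
  let p := pvLoop s 0 (s.length - 1) 0 0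
  if p.1 == p.2 then "Balanced" else "Not Balanced"

-- ===== PRECONDITION & SPEC =====
-- Pre_ excludes number ≤ -10: there str(number) has length ≥ 3 and contains '-',
-- so int('-') raises ValueError in A (and in B alike).
def Pre_balanced_num (number : Int) : Prop := -9 ≤ number
instance (number : Int) : Decidable (Pre_balanced_num number) := by unfold Pre_balanced_num; infer_instance
def pvWitness_balanced_num : Int := 12321

def Spec_balanced_num (number : Int) (out : String) : Prop := out = balanced_num_alt number
instance (number : Int) (out : String) : Decidable (Spec_balanced_num number out) := by unfold Spec_balanced_num; infer_instance

-- ===== CLAIM (what is proved, stated in full; the proofs are below) =====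
def Claim_equal_balanced_num : Prop := ∀ (number : Int), Dom_balanced_num number → Pre_balanced_num number → Spec_balanced_num number (balanced_num number)

-- ===== LEMMAS AND PROOFS =====
def pvDsum (l : List Char) : Int := (l.map pvDval).sum

lemma pvLoop_eq (l : List Char) : ∀ (t i j : Nat) (ls rs : Int),
    (j = i + 2 * t ∨ j = i + 2 * t + 1) → j < l.length →
    pvLoop l i j ls rs =
      (ls + pvDsum ((l.drop i).take t), rs + pvDsum ((l.drop (j + 1 - t)).take t)) := by
  intro t
  induction t with
  | zero =>
    intro i j ls rs hj _
    rw [pvLoop]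
    have : ¬ i + 2 ≤ j := by omega
    simp [this, pvDsum]
  | succ t ih =>
    intro i j ls rs hj hlen
    have hij : i + 2 ≤ j := by omega
    have hi : i < l.length := by omega
    have hjt : j + 1 - (t + 1) = j - t := by omega
    rw [pvLoop, if_pos hij,
        ih (i + 1) (j - 1) _ _ (by omega) (by omega)]
    have hgi : l.getD i ' ' = l[i] := List.getD_eq_getElem l ' ' hi
    have hgj : l.getD j ' ' = l[j] := List.getD_eq_getElem l ' ' hlen
    have hleft : (l.drop i).take (t + 1) = l[i] :: (l.drop (i + 1)).take t := by
      rw [List.drop_eq_getElem_cons hi, List.take_succ_cons]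
    have hseglen : t < (l.drop (j - t)).length := by
      rw [List.length_drop]; omega
    have hsegget : (l.drop (j - t))[t]? = some l[j] := by
      rw [List.getElem?_drop]
      have : j - t + t = j := by omega
      rw [this, List.getElem?_eq_getElem hlen]
    have hright : (l.drop (j - t)).take (t + 1) = (l.drop (j - t)).take t ++ [l[j]] := by
      rw [List.take_add_one, hsegget]; rfl
    have h1 : j - 1 + 1 - t = j - t := by omega
    rw [h1, hjt, hgi, hgj, hleft, hright]
    simp [pvDsum]
    constructor <;> ring

lemma pvFoldl_dsum (l : List Char) : l.foldl (fun a c => a + pvDval c) 0 = pvDsum l := by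
  rw [PySem.List.foldl_add (g := pvDval)]
  simp [pvDsum]

lemma pvTake_all_of_len {α : Type} (l : List α) (n : Nat) (h : l.length ≤ n) : l.take n = l :=
  List.take_of_length_le h

-- ===== VERDICT (by name: the statement is the Claim_ definition above) =====
theorem balanced_num_spec : Claim_equal_balanced_num := by
  intro number _ _
  unfold Spec_balanced_num balanced_num balanced_num_alt
  generalize PySem.Int.toChars number = l
  simp only []
  by_cases h2 : l.length ≤ 2
  · rw [if_pos h2, pvLoop]
    have : ¬ 0 + 2 ≤ l.length - 1 := by omega
    rw [if_neg this]
    simp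
  · rw [if_neg h2]
    by_cases hodd : l.length % 2 ≠ 0
    · -- odd length n = 2k+1, k = n/2
      rw [if_pos hodd]
      have hk : l.length = 2 * (l.length / 2) + 1 := by omega
      set k := l.length / 2 with hkdef
      have hloop := pvLoop_eq l k 0 (l.length - 1) 0 0 (Or.inl (by omega)) (by omega)
      rw [PySem.List.slice_to_natCast]
      have hc : (k : Int) + 1 = ((k + 1 : Nat) : Int) := by push_cast; ring
      rw [hc, PySem.List.slice_from_natCast]
      rw [hloop]
      have hdrop0 : l.drop 0 = l := List.drop_zero
      have hj1 : l.length - 1 + 1 - k = k + 1 := by omega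
      have hlen : (l.drop (k + 1)).length ≤ k := by rw [List.length_drop]; omega
      rw [hdrop0, hj1, pvTake_all_of_len _ _ hlen]
      simp [pvFoldl_dsum]
    · -- even length n = 2k, k = n/2 ≥ 2
      rw [if_neg hodd]
      have hk : l.length = 2 * (l.length / 2) := by omega
      set k := l.length / 2 with hkdef
      have hk2 : 2 ≤ k := by omega
      have hloop := pvLoop_eq l (k - 1) 0 (l.length - 1) 0 0 (Or.inr (by omega)) (by omega)
      have hc1 : (k : Int) - 1 = ((k - 1 : Nat) : Int) := by
        have : ((k - 1 : Nat) : Int) = (k : Int) - 1 := by omega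
        omega
      rw [hc1, PySem.List.slice_to_natCast]
      have hc : (k : Int) + 1 = ((k + 1 : Nat) : Int) := by push_cast; ring
      rw [hc, PySem.List.slice_from_natCast]
      rw [hloop]
      have hdrop0 : l.drop 0 = l := List.drop_zero
      have hj1 : l.length - 1 + 1 - (k - 1) = k + 1 := by omega
      have hlen : (l.drop (k + 1)).length ≤ k - 1 := by rw [List.length_drop]; omega
      rw [hdrop0, hj1, pvTake_all_of_len _ _ hlen]
      simp [pvFoldl_dsum]
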